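-- pv_equiv track=rewrite | github.com/menasheofd/gmail-protect | up.py | get_all_capital_letters_sequences_lengths
-- ===== SOURCE A (Python) =====
-- def get_all_capital_letters_sequences_lengths(data):
--     capital_letters_sequences_lengths = []
--     length = 0
--     flag = False
--
--     for letter in data:
--         if letter.isupper():
--             length += 1
--             flag = True
--
--         else:
--             if flag:
--                 capital_letters_sequences_lengths.append(length)
--                 length = 0
--             flag = False
--
--     if flag:
--         capital_letters_sequences_lengths.append(length)
--
--     return capital_letters_sequences_lengths
-- ===== SOURCE B (Python) =====
-- def get_all_capital_letters_sequences_lengths(data):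
--     res = []
--     i = 0
--     n = len(data)
--     while i < n:
--         if data[i].isupper():
--             j = i + 1
--             while j < n and data[j].isupper():
--                 j += 1
--             res.append(j - i)
--             i = j
--         else:
--             i += 1
--     return res
-- ===== Notes on version B (the rewrite author's own statement) =====
-- stated objective: alternative
-- what changed: Replaces A's one-pass flag/accumulator state machine with a two-pointer index scan that, at each uppercase position, advances a second pointer to the end of the run and appends its length directly, needing no flag or pending-length state.
import Mathlib
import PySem

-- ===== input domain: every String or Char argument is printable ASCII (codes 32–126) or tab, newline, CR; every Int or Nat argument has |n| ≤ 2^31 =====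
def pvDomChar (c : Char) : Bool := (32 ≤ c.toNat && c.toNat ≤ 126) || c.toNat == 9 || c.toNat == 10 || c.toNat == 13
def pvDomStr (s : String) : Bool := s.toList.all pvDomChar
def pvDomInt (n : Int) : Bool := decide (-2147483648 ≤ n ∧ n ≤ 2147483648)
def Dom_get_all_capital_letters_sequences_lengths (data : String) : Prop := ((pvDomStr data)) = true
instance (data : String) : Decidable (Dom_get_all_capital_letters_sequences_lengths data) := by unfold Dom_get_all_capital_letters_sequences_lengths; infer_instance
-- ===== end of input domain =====

-- B replaces A's flag/accumulator state machine by a two-pointer run-jumping scan; same O(n) cost ("alternative").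

-- ===== PORT A =====
-- state: (capital_letters_sequences_lengths, length, flag)
def get_all_capital_letters_sequences_lengths (data : String) : List Int :=
  let s := data.toList.foldl
    (fun (st : List Int × Int × Bool) letter =>
      if PySem.Chars.isupper letter then (st.1, st.2.1 + 1, true)
      else if st.2.2 then (st.1 ++ [st.2.1], 0, false) else (st.1, st.2.1, false))
    ([], 0, false)
  if s.2.2 then s.1 ++ [s.2.1] else s.1

-- ===== PORT B =====
-- the outer while loop: the index i either steps past a non-uppercase char, or jumps
-- to the end of the current uppercase run (the inner while = takeWhile/dropWhile) and records its length
def pvScanB : List Char → List Int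
  | [] => []
  | c :: rest =>
    if PySem.Chars.isupper c then
      (1 + ((rest.takeWhile PySem.Chars.isupper).length : Int)) ::
        pvScanB (rest.dropWhile PySem.Chars.isupper)
    else
      pvScanB rest
termination_by l => l.length
decreasing_by
  · exact Nat.lt_succ_of_le (List.length_dropWhile_le _ _)
  · exact Nat.lt_succ_self _

def get_all_capital_letters_sequences_lengths_alt (data : String) : List Int :=
  pvScanB data.toList

-- ===== PRECONDITION & SPEC =====
def Spec_get_all_capital_letters_sequences_lengths (data : String) (out : List Int) : Prop := out = get_all_capital_letters_sequences_lengths_alt data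
instance (data : String) (out : List Int) : Decidable (Spec_get_all_capital_letters_sequences_lengths data out) := by unfold Spec_get_all_capital_letters_sequences_lengths; infer_instance

-- ===== CLAIM (what is proved, stated in full; the proofs are below) =====
def Claim_equal_get_all_capital_letters_sequences_lengths : Prop := ∀ (data : String), Dom_get_all_capital_letters_sequences_lengths data → Spec_get_all_capital_letters_sequences_lengths data (get_all_capital_letters_sequences_lengths data)

-- ===== LEMMAS AND PROOFS =====

-- A's loop, written as structural recursion on the remaining input with the pending (length, flag) state
def pvRunsA : List Char → Int → Bool → List Int
  | [], len, flag => if flag then [len] else []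
  | c :: rest, len, flag =>
    if PySem.Chars.isupper c then pvRunsA rest (len + 1) true
    else if flag then len :: pvRunsA rest 0 false else pvRunsA rest len false

theorem foldA_eq_pvRunsA (l : List Char) : ∀ (acc : List Int) (len : Int) (flag : Bool),
    (let s := l.foldl
      (fun (st : List Int × Int × Bool) letter =>
        if PySem.Chars.isupper letter then (st.1, st.2.1 + 1, true)
        else if st.2.2 then (st.1 ++ [st.2.1], 0, false) else (st.1, st.2.1, false))
      (acc, len, flag)
     if s.2.2 then s.1 ++ [s.2.1] else s.1) = acc ++ pvRunsA l len flag := by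
  induction l with
  | nil => intro acc len flag; cases flag <;> simp [pvRunsA]
  | cons c rest ih =>
    intro acc len flag
    simp only [List.foldl_cons, pvRunsA]
    by_cases h : PySem.Chars.isupper c
    · simp only [h, if_true, ih]
    · simp only [h, if_false, Bool.false_eq_true]
      cases flag <;> simp [ih]

theorem pvRunsA_true (l : List Char) : ∀ (len : Int),
    pvRunsA l len true =
      (len + ((l.takeWhile PySem.Chars.isupper).length : Int)) ::
        pvRunsA (l.dropWhile PySem.Chars.isupper) 0 false := by
  induction l with
  | nil => intro len; simp [pvRunsA]
  | cons c rest ih =>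
    intro len
    by_cases h : PySem.Chars.isupper c
    · simp only [pvRunsA, h, if_true, ih, List.takeWhile_cons, List.dropWhile_cons]
      congr 1
      simp only [List.length_cons]
      push_cast
      ring
    · simp [pvRunsA, h]

theorem pvScanB_eq_pvRunsA (l : List Char) : pvScanB l = pvRunsA l 0 false := by
  induction l using pvScanB.induct with
  | case1 => simp [pvScanB, pvRunsA]
  | case2 c rest h ih =>
    rw [pvScanB, if_pos h, pvRunsA.eq_def]
    simp only [h, if_true, pvRunsA_true, ih]
    norm_num
  | case3 c rest h ih =>
    rw [pvScanB, if_neg h, pvRunsA.eq_def]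
    simp [h, ih]

-- ===== VERDICT (by name: the statement is the Claim_ definition above) =====
theorem get_all_capital_letters_sequences_lengths_spec : Claim_equal_get_all_capital_letters_sequences_lengths := by
  intro data _
  unfold Spec_get_all_capital_letters_sequences_lengths get_all_capital_letters_sequences_lengths get_all_capital_letters_sequences_lengths_alt
  rw [pvScanB_eq_pvRunsA]
  simpa using foldA_eq_pvRunsA data.toList [] 0 false
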